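-- pv_equiv track=rewrite | github.com/AI-replica/filenames_sanitizer | utils/languages.py | transliterate_according_to_scheme
-- ===== SOURCE A (Python) =====
-- def transliterate_according_to_scheme(text, source_target_dict):
--     """ """
--
--     result = ""
--     for char in text:
--         if char.isupper():
--             result += source_target_dict.get(char.lower(), char).upper()
--         else:
--             result += source_target_dict.get(char, char)
--     return result
-- ===== SOURCE B (Python) =====
-- def transliterate_according_to_scheme(text, source_target_dict):
--     """Build a translation table once (lowercase keys plus precomputed
--     uppercase variants), then do one uniform table lookup per character."""
--     table = {}
--     for key, value in source_target_dict.items():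
--         if len(key) == 1 and not key.isupper():
--             table[key] = value
--             upper_key = key.upper()
--             if upper_key != key:
--                 table[upper_key] = value.upper()
--     return "".join(table.get(char, char) for char in text)
-- ===== Notes on version B (the rewrite author's own statement) =====
-- stated objective: alternative
-- what changed: B precomputes one translation table (each lowercase-style key plus its derived uppercase variant mapping to the uppercased value) and then does a single uniform table lookup per character, instead of A's per-character isupper branch with lower()/upper() calls inside the loop.
import Mathlib
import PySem

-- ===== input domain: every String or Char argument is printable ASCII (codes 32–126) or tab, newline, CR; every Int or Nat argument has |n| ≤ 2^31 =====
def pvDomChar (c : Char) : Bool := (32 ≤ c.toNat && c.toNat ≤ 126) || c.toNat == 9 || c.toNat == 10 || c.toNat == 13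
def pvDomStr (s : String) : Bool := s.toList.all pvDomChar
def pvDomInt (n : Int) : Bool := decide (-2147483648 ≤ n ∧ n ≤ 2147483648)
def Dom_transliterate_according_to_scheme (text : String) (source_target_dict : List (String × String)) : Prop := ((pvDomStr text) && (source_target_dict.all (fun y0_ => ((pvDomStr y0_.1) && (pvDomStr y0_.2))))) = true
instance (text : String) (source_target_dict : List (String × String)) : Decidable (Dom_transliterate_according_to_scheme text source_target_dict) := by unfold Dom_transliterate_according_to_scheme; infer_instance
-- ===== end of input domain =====

-- ===== PORT A =====
-- B changes the structure: one precomputed case-aware translation table, then a uniform lookup per character (objective: alternative).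
-- A: per character, branch on isupper and look the (lowered) char up in the dict.
def transliterate_according_to_scheme (text : String) (source_target_dict : List (String × String)) : String :=
  let d := PySem.Dict.mk source_target_dict
  String.ofList (text.toList.foldl (fun result c =>
    if PySem.Chars.isupper c then
      result ++ (PySem.Str.upper (d.getD (PySem.Str.lower (String.ofList [c])) (String.ofList [c]))).toList
    else
      result ++ (d.getD (String.ofList [c]) (String.ofList [c])).toList) [])

-- ===== PORT B =====
-- Python's str.isupper() on a ONE-character ASCII string (the only place Source B calls it, under len(key) == 1)
-- equals PySem.Chars.isupper of that character; exact on the ASCII domain.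
def pvStr1IsUpper (k : String) : Bool := k.toList.any PySem.Chars.isupper

-- B: build the table once (key ↦ value, and for cased keys upper(key) ↦ upper(value)), then one lookup per char.
def transliterate_according_to_scheme_alt (text : String) (source_target_dict : List (String × String)) : String :=
  let table := source_target_dict.foldl (fun t kv =>
    if PySem.Str.len kv.1 == 1 && !(pvStr1IsUpper kv.1) then
      let t1 := t.insert kv.1 kv.2
      let upper_key := PySem.Str.upper kv.1
      if upper_key ≠ kv.1 then t1.insert upper_key (PySem.Str.upper kv.2) else t1
    else t) PySem.Dict.empty
  PySem.Str.join "" (text.toList.map (fun c => table.getD (String.ofList [c]) (String.ofList [c])))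

-- ===== PRECONDITION & SPEC =====
-- Pre_ requires pairwise-distinct keys, which is automatic for a Python dict argument (it excludes no
-- Python-level input): on the association-list ENCODING a duplicate key would make A's first-match
-- lookup and B's insertion-built table disagree, a corner no Python dict can reach.
def Pre_transliterate_according_to_scheme (text : String) (source_target_dict : List (String × String)) : Prop :=
  (source_target_dict.map Prod.fst).Nodup
instance (text : String) (source_target_dict : List (String × String)) : Decidable (Pre_transliterate_according_to_scheme text source_target_dict) := by unfold Pre_transliterate_according_to_scheme; infer_instance
def pvWitness_transliterate_according_to_scheme : String × (List (String × String)) :=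
  ("Ab!", [("a", "x"), ("b", "yz")])
def Spec_transliterate_according_to_scheme (text : String) (source_target_dict : List (String × String)) (out : String) : Prop := out = transliterate_according_to_scheme_alt text source_target_dict
instance (text : String) (source_target_dict : List (String × String)) (out : String) : Decidable (Spec_transliterate_according_to_scheme text source_target_dict out) := by unfold Spec_transliterate_according_to_scheme; infer_instance

-- ===== CLAIM (what is proved, stated in full; the proofs are below) =====
def Claim_equal_transliterate_according_to_scheme : Prop := ∀ (text : String) (source_target_dict : List (String × String)), Dom_transliterate_according_to_scheme text source_target_dict → Pre_transliterate_according_to_scheme text source_target_dict → Spec_transliterate_according_to_scheme text source_target_dict (transliterate_according_to_scheme text source_target_dict)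

-- ===== LEMMAS AND PROOFS =====

theorem pv_isupper_iff (c : Char) : PySem.Chars.isupper c = true ↔ 65 ≤ c.toNat ∧ c.toNat ≤ 90 := by
  unfold PySem.Chars.isupper
  rw [Bool.and_eq_true, decide_eq_true_iff, decide_eq_true_iff, Char.le_def, Char.le_def,
    UInt32.le_iff_toNat_le, UInt32.le_iff_toNat_le]
  exact Iff.rfl

theorem pv_islower_iff (c : Char) : PySem.Chars.islower c = true ↔ 97 ≤ c.toNat ∧ c.toNat ≤ 122 := by
  unfold PySem.Chars.islower
  rw [Bool.and_eq_true, decide_eq_true_iff, decide_eq_true_iff, Char.le_def, Char.le_def,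
    UInt32.le_iff_toNat_le, UInt32.le_iff_toNat_le]
  exact Iff.rfl

theorem pv_toNat_ofNat_small (n : Nat) (h : n < 55296) : (Char.ofNat n).toNat = n := by
  rw [Char.toNat_ofNat, if_pos (Or.inl h)]

theorem pv_char_eq_of_toNat_eq (a b : Char) (h : a.toNat = b.toNat) : a = b := by
  apply Char.ext
  exact UInt32.toNat_inj.mp h

theorem pv_toNat_lowerChar (c : Char) (h : PySem.Chars.isupper c = true) :
    (PySem.Chars.lowerChar c).toNat = c.toNat + 32 := by
  have h2 := (pv_isupper_iff c).mp h
  rw [PySem.Chars.lowerChar, if_pos h, pv_toNat_ofNat_small _ (by omega)]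

theorem pv_toNat_upperChar (c : Char) (h : PySem.Chars.islower c = true) :
    (PySem.Chars.upperChar c).toNat = c.toNat - 32 := by
  have h2 := (pv_islower_iff c).mp h
  rw [PySem.Chars.upperChar, if_pos h, pv_toNat_ofNat_small _ (by omega)]

-- lowered uppercase letter: not upper, and upperChar brings it back
theorem pv_lower_not_upper (c : Char) (h : PySem.Chars.isupper c = true) :
    PySem.Chars.isupper (PySem.Chars.lowerChar c) = false := by
  have h2 := (pv_isupper_iff c).mp h
  have h3 := pv_toNat_lowerChar c h
  rw [Bool.eq_false_iff]
  intro hc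
  have := (pv_isupper_iff _).mp hc
  omega

theorem pv_lower_islower (c : Char) (h : PySem.Chars.isupper c = true) :
    PySem.Chars.islower (PySem.Chars.lowerChar c) = true := by
  have h2 := (pv_isupper_iff c).mp h
  have h3 := pv_toNat_lowerChar c h
  rw [pv_islower_iff]; omega

theorem pv_upper_lower (c : Char) (h : PySem.Chars.isupper c = true) :
    PySem.Chars.upperChar (PySem.Chars.lowerChar c) = c := by
  apply pv_char_eq_of_toNat_eq
  rw [pv_toNat_upperChar _ (pv_lower_islower c h), pv_toNat_lowerChar c h]
  omega

theorem pv_lower_ne (c : Char) (h : PySem.Chars.isupper c = true) :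
    PySem.Chars.lowerChar c ≠ c := by
  intro he
  have h2 := (pv_isupper_iff c).mp h
  have h3 := pv_toNat_lowerChar c h
  rw [he] at h3; omega

theorem pv_upperChar_self (c : Char) (h : PySem.Chars.isupper c = true) :
    PySem.Chars.upperChar c = c := by
  have h2 := (pv_isupper_iff c).mp h
  rw [PySem.Chars.upperChar, if_neg]
  rw [Bool.not_eq_true, Bool.eq_false_iff]
  intro hl
  have := (pv_islower_iff c).mp hl; omega

theorem pv_upper_isupper (c : Char) (h : PySem.Chars.islower c = true) :
    PySem.Chars.isupper (PySem.Chars.upperChar c) = true := by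
  have h2 := (pv_islower_iff c).mp h
  rw [pv_isupper_iff, pv_toNat_upperChar c h]; omega

theorem pv_islower_of_upperChar_ne (c : Char) (_hu : PySem.Chars.isupper c = false)
    (hne : PySem.Chars.upperChar c ≠ c) : PySem.Chars.islower c = true := by
  by_contra hl
  exact hne (by rw [PySem.Chars.upperChar, if_neg hl])

theorem pv_upperChar_eq_iff (k c : Char) (hk : PySem.Chars.islower k = true)
    (hc : PySem.Chars.isupper c = true) :
    PySem.Chars.upperChar k = c ↔ k = PySem.Chars.lowerChar c := by
  have h1 := (pv_islower_iff k).mp hk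
  have h2 := (pv_isupper_iff c).mp hc
  have h3 := pv_toNat_upperChar k hk
  have h4 := pv_toNat_lowerChar c hc
  constructor
  · intro h; apply pv_char_eq_of_toNat_eq; rw [h4, ← h]; rw [h3]; omega
  · intro h; apply pv_char_eq_of_toNat_eq; rw [h3, h, h4]; omega

-- the per-pair step of B's table-building fold
def pvStep (t : PySem.Dict String String) (kv : String × String) : PySem.Dict String String :=
  if PySem.Str.len kv.1 == 1 && !(pvStr1IsUpper kv.1) then
    let t1 := t.insert kv.1 kv.2
    let upper_key := PySem.Str.upper kv.1
    if upper_key ≠ kv.1 then t1.insert upper_key (PySem.Str.upper kv.2) else t1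
  else t

theorem pv_ofList_singleton_inj (a b : Char) (h : String.ofList [a] = String.ofList [b]) : a = b := by
  have := congrArg String.toList h; simpa using this

theorem pv_upper_singleton (c : Char) :
    PySem.Str.upper (String.ofList [c]) = String.ofList [PySem.Chars.upperChar c] := by
  simp [PySem.Str.upper, PySem.Chars.upper]

theorem pv_lower_singleton (c : Char) :
    PySem.Str.lower (String.ofList [c]) = String.ofList [PySem.Chars.lowerChar c] := by
  simp [PySem.Str.lower, PySem.Chars.lower]


-- a failing guard, or inserted keys different from the probed one, leave the lookup unchanged
theorem pv_step_preserve (t : PySem.Dict String String) (k v : String) (c : Char)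
    (h1 : (PySem.Str.len k == 1 && !(pvStr1IsUpper k)) = true →
      k ≠ String.ofList [c] ∧ PySem.Str.upper k ≠ String.ofList [c]) :
    (pvStep t (k, v)).getD (String.ofList [c]) (String.ofList [c]) =
      t.getD (String.ofList [c]) (String.ofList [c]) := by
  unfold pvStep
  by_cases g1 : (PySem.Str.len (k, v).1 == 1 && !(pvStr1IsUpper (k, v).1)) = true
  · rw [if_pos g1]
    obtain ⟨h1a, h1b⟩ := h1 g1
    show (if PySem.Str.upper k ≠ k then
        (t.insert k v).insert (PySem.Str.upper k) (PySem.Str.upper v)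
      else t.insert k v).getD (String.ofList [c]) (String.ofList [c]) = _
    split_ifs with g2
    · rw [PySem.Dict.getD_insert, if_neg (Ne.symm h1b), PySem.Dict.getD_insert, if_neg (Ne.symm h1a)]
    · rw [PySem.Dict.getD_insert, if_neg (Ne.symm h1a)]
  · rw [if_neg g1]

-- what a true guard says about the key
theorem pv_guard_facts (k : String) (h : (PySem.Str.len k == 1 && !(pvStr1IsUpper k)) = true) :
    ∃ k0 : Char, k = String.ofList [k0] ∧ PySem.Chars.isupper k0 = false := by
  rw [Bool.and_eq_true] at h
  obtain ⟨hlen, hup⟩ := h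
  rw [beq_iff_eq, PySem.Str.len_eq] at hlen
  have hlen' : k.toList.length = 1 := by exact_mod_cast hlen
  obtain ⟨k0, hk0⟩ := List.length_eq_one_iff.mp hlen'
  refine ⟨k0, ?_, ?_⟩
  · rw [← hk0, String.ofList_toList]
  · rw [Bool.not_eq_eq_eq_not, Bool.not_true] at hup
    simpa [pvStr1IsUpper, hk0] using hup

theorem pv_intercalate_nil (l : List (List Char)) : List.intercalate [] l = l.flatten := by
  induction l with
  | nil => rfl
  | cons x xs ih =>
    cases xs with
    | nil => simp [List.intercalate]
    | cons y ys =>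
      simp only [List.intercalate, List.intersperse_cons₂, List.flatten_cons, List.nil_append] at ih ⊢
      rw [ih]

-- the model of a lookup in B's table, in terms of the original association list (first match)
theorem pv_table_lookup (c : Char) (sd : List (String × String))
    (hnd : (sd.map Prod.fst).Nodup) : ∀ t : PySem.Dict String String,
    (sd.foldl pvStep t).getD (String.ofList [c]) (String.ofList [c]) =
      if PySem.Chars.isupper c then
        match (PySem.Dict.mk sd).get? (String.ofList [PySem.Chars.lowerChar c]) with
        | some v => PySem.Str.upper v
        | none => t.getD (String.ofList [c]) (String.ofList [c])
      else
        match (PySem.Dict.mk sd).get? (String.ofList [c]) with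
        | some v => v
        | none => t.getD (String.ofList [c]) (String.ofList [c]) := by
  induction sd with
  | nil =>
    intro t
    have hnil : ∀ x : String, (PySem.Dict.mk ([] : List (String × String))).get? x = none := by
      intro x
      rw [PySem.Dict.get?_eq_none_iff_not_mem_keys, PySem.Dict.keys_mk]
      simp
    rw [List.foldl_nil]
    by_cases hc : PySem.Chars.isupper c = true
    · rw [if_pos hc, hnil]
    · rw [if_neg hc, hnil]
  | cons kv rest ih =>
    obtain ⟨k, v⟩ := kv
    rw [List.map_cons, List.nodup_cons] at hnd
    intro t
    rw [List.foldl_cons, ih hnd.2 (pvStep t (k, v))]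
    by_cases hc : PySem.Chars.isupper c = true
    · rw [if_pos hc, if_pos hc, PySem.Dict.get?_mk_cons]
      by_cases hk : k = String.ofList [PySem.Chars.lowerChar c]
      · have hbeq : (k == String.ofList [PySem.Chars.lowerChar c]) = true := beq_iff_eq.mpr hk
        rw [if_pos hbeq]
        have hnone : (PySem.Dict.mk rest).get? (String.ofList [PySem.Chars.lowerChar c]) = none := by
          rw [PySem.Dict.get?_eq_none_iff_not_mem_keys, PySem.Dict.keys_mk]
          rw [hk] at hnd
          exact hnd.1
        rw [hnone]
        -- compute the step on the matching key
        unfold pvStep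
        have hg1 : (PySem.Str.len (k, v).1 == 1 && !(pvStr1IsUpper (k, v).1)) = true := by
          simp [hk, PySem.Str.len_eq, pvStr1IsUpper, pv_lower_not_upper c hc]
        rw [if_pos hg1]
        have hupk : PySem.Str.upper (k, v).1 = String.ofList [c] := by
          simp only [hk]
          rw [pv_upper_singleton, pv_upper_lower c hc]
        have hg2 : PySem.Str.upper (k, v).1 ≠ (k, v).1 := by
          rw [hupk]
          simp only [hk]
          intro he
          exact pv_lower_ne c hc (pv_ofList_singleton_inj _ _ he.symm)
        rw [if_pos hg2, hupk, PySem.Dict.getD_insert, if_pos rfl]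
      · have hbeq : (k == String.ofList [PySem.Chars.lowerChar c]) = false := by
          simpa using hk
        rw [if_neg (by simp [hbeq])]
        cases hres : (PySem.Dict.mk rest).get? (String.ofList [PySem.Chars.lowerChar c]) with
        | some w => rfl
        | none =>
          apply pv_step_preserve
          intro hg
          obtain ⟨k0, hk0, hk0up⟩ := pv_guard_facts k hg
          constructor
          · intro he
            have : k0 = c := pv_ofList_singleton_inj _ _ (hk0 ▸ he)
            rw [this] at hk0up
            rw [hk0up] at hc
            exact Bool.false_ne_true hc
          · intro he
            rw [hk0, pv_upper_singleton] at he
            have heq : PySem.Chars.upperChar k0 = c := pv_ofList_singleton_inj _ _ he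
            by_cases hne : PySem.Chars.upperChar k0 = k0
            · rw [hne] at heq
              rw [heq] at hk0up
              rw [hk0up] at hc
              exact Bool.false_ne_true hc
            · have hlow := pv_islower_of_upperChar_ne k0 hk0up hne
              have := (pv_upperChar_eq_iff k0 c hlow hc).mp heq
              exact hk (by rw [hk0, this])
    · rw [if_neg hc, if_neg hc, PySem.Dict.get?_mk_cons]
      by_cases hk : k = String.ofList [c]
      · have hbeq : (k == String.ofList [c]) = true := beq_iff_eq.mpr hk
        rw [if_pos hbeq]
        have hnone : (PySem.Dict.mk rest).get? (String.ofList [c]) = none := by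
          rw [PySem.Dict.get?_eq_none_iff_not_mem_keys, PySem.Dict.keys_mk]
          rw [hk] at hnd
          exact hnd.1
        rw [hnone]
        unfold pvStep
        have hcf : PySem.Chars.isupper c = false := Bool.eq_false_iff.mpr hc
        have hg1 : (PySem.Str.len (k, v).1 == 1 && !(pvStr1IsUpper (k, v).1)) = true := by
          simp [hk, PySem.Str.len_eq, pvStr1IsUpper, hcf]
        rw [if_pos hg1]
        by_cases hg2 : PySem.Str.upper (k, v).1 ≠ (k, v).1
        · rw [if_pos hg2]
          have hupk : PySem.Str.upper (k, v).1 = String.ofList [PySem.Chars.upperChar c] := by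
            simp only [hk]
            exact pv_upper_singleton c
          have hne2 : String.ofList [c] ≠ PySem.Str.upper (k, v).1 := by
            rw [hupk]
            intro he
            have heq : c = PySem.Chars.upperChar c := pv_ofList_singleton_inj _ _ he
            have hlow : PySem.Chars.islower c = true := by
              apply pv_islower_of_upperChar_ne c hcf
              rw [hupk, hk] at hg2
              intro hee
              exact hg2 (congrArg (fun x => String.ofList [x]) hee)
            have hupp := pv_upper_isupper c hlow
            rw [← heq] at hupp
            rw [hupp] at hcf
            simp at hcf
          rw [PySem.Dict.getD_insert, if_neg hne2, PySem.Dict.getD_insert, if_pos hk.symm]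
        · rw [if_neg hg2]
          rw [PySem.Dict.getD_insert, if_pos hk.symm]
      · have hbeq : (k == String.ofList [c]) = false := by simpa using hk
        rw [if_neg (by simp [hbeq])]
        cases hres : (PySem.Dict.mk rest).get? (String.ofList [c]) with
        | some w => rfl
        | none =>
          apply pv_step_preserve
          intro hg
          obtain ⟨k0, hk0, hk0up⟩ := pv_guard_facts k hg
          refine ⟨hk, ?_⟩
          intro he
          rw [hk0, pv_upper_singleton] at he
          have heq : PySem.Chars.upperChar k0 = c := pv_ofList_singleton_inj _ _ he
          by_cases hne : PySem.Chars.upperChar k0 = k0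
          · rw [hne] at heq
            exact hk (by rw [hk0, heq])
          · have hlow := pv_islower_of_upperChar_ne k0 hk0up hne
            have hupp := pv_upper_isupper k0 hlow
            rw [heq] at hupp
            exact hc hupp

-- A's per-char contribution equals B's table lookup
theorem pv_char_agree (c : Char) (sd : List (String × String))
    (hnd : (sd.map Prod.fst).Nodup) :
    (sd.foldl pvStep PySem.Dict.empty).getD (String.ofList [c]) (String.ofList [c]) =
      if PySem.Chars.isupper c then
        PySem.Str.upper ((PySem.Dict.mk sd).getD (PySem.Str.lower (String.ofList [c])) (String.ofList [c]))
      else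
        (PySem.Dict.mk sd).getD (String.ofList [c]) (String.ofList [c]) := by
  rw [pv_table_lookup c sd hnd PySem.Dict.empty]
  by_cases hc : PySem.Chars.isupper c = true
  · rw [if_pos hc, if_pos hc, pv_lower_singleton]
    cases hres : (PySem.Dict.mk sd).get? (String.ofList [PySem.Chars.lowerChar c]) with
    | some w => rw [PySem.Dict.getD_of_get?_eq_some _ _ hres]
    | none =>
      rw [PySem.Dict.getD_of_get?_eq_none _ _ hres, PySem.Dict.getD_empty,
        pv_upper_singleton, pv_upperChar_self c hc]
  · rw [if_neg hc, if_neg hc]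
    cases hres : (PySem.Dict.mk sd).get? (String.ofList [c]) with
    | some w => rw [PySem.Dict.getD_of_get?_eq_some _ _ hres]
    | none => rw [PySem.Dict.getD_of_get?_eq_none _ _ hres, PySem.Dict.getD_empty]

-- ===== VERDICT (by name: the statement is the Claim_ definition above) =====
theorem transliterate_according_to_scheme_spec : Claim_equal_transliterate_according_to_scheme := by
  intro text sd _ hpre
  unfold Spec_transliterate_according_to_scheme
  unfold transliterate_according_to_scheme transliterate_according_to_scheme_alt
  show String.ofList _ = PySem.Str.join _ _
  rw [PySem.Str.join]
  have hfold : ∀ (l : List (String × String)) (init : PySem.Dict String String),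
      l.foldl (fun t kv =>
        if PySem.Str.len kv.1 == 1 && !(pvStr1IsUpper kv.1) then
          let t1 := t.insert kv.1 kv.2
          let upper_key := PySem.Str.upper kv.1
          if upper_key ≠ kv.1 then t1.insert upper_key (PySem.Str.upper kv.2) else t1
        else t) init = l.foldl pvStep init := by
    intro l init
    rfl
  rw [hfold]
  congr 1
  have hstep : (fun (result : List Char) (c : Char) =>
      if PySem.Chars.isupper c then
        result ++ (PySem.Str.upper ((PySem.Dict.mk sd).getD (PySem.Str.lower (String.ofList [c])) (String.ofList [c]))).toList
      else
        result ++ ((PySem.Dict.mk sd).getD (String.ofList [c]) (String.ofList [c])).toList) =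
      fun (result : List Char) (c : Char) => result ++
        (if PySem.Chars.isupper c then
          PySem.Str.upper ((PySem.Dict.mk sd).getD (PySem.Str.lower (String.ofList [c])) (String.ofList [c]))
        else
          (PySem.Dict.mk sd).getD (String.ofList [c]) (String.ofList [c])).toList := by
    funext r c
    split_ifs <;> rfl
  rw [hstep, PySem.List.foldl_append_eq_flatMap, List.nil_append, List.flatMap_def,
    PySem.Chars.join, show ("" : String).toList = [] from rfl, pv_intercalate_nil]
  congr 1
  rw [List.map_map]
  apply List.map_congr_left
  intro c _
  simp only [Function.comp_apply]
  rw [pv_char_agree c sd hpre]
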